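-- pv_equiv track=rewrite | github.com/sidejackthenativity/Combinator | LFIgen.py | generate_combinations_2d
-- ===== SOURCE A (Python) =====
-- def generate_combinations_2d(arr_2d):
--     if not arr_2d or not all(arr_2d):
--         return []
--
--     rows = len(arr_2d) #3
--     cols = max(len(row) for row in arr_2d) #3
--
--
--     combinations = []
--
--     for a in arr_2d[0]: #grab a value
--         for b in range(1, rows):
--             for c in range(len(arr_2d[b])):
--                 next_element = arr_2d[b][c]
--                 combinations.append((f"{a}{a}{next_element}")*5+"test")
--
--
--     return combinations
-- ===== SOURCE B (Python) =====
-- def generate_combinations_2d(arr_2d):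
--     if not arr_2d or not all(arr_2d):
--         return []
--     head = arr_2d[0]
--     flat = []
--     for i in range(1, len(arr_2d)):
--         flat += arr_2d[i]
--     m = len(flat)
--     return [(f"{head[k // m]}{head[k // m]}{flat[k % m]}") * 5 + "test"
--             for k in range(len(head) * m)]
-- ===== Notes on version B (the rewrite author's own statement) =====
-- stated objective: alternative
-- what changed: B replaces A's triple nested loops with an arithmetical index formulation: it flattens the tail rows once, then a single loop over one index k in range(len(head)*len(flat)) recovers the pair via k//m and k%m instead of nesting loops over rows and columns.
import Mathlib
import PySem

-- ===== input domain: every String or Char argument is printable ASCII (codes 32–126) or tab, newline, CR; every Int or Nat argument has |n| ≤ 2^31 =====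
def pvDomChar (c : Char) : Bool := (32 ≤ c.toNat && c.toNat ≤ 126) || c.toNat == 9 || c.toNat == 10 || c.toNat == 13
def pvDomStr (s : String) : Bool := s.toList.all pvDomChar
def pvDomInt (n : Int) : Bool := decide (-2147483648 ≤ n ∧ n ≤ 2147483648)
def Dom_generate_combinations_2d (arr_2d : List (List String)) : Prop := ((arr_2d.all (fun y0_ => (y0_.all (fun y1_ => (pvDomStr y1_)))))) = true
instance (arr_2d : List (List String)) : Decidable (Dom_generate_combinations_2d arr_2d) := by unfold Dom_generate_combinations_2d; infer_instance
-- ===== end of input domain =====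

-- B replaces A's triple nested loops with an arithmetical index formulation: one flat
-- loop over a single index k, recovering the pair via k // m and k % m (objective: alternative).

-- (f"{a}{a}{ne}")*5 + "test" — shared format helper, identical in both Pythons
def pvFmt (a ne : String) : String :=
  let s := a ++ a ++ ne
  s ++ s ++ s ++ s ++ s ++ "test"

-- ===== PORT A =====
def generate_combinations_2d (arr_2d : List (List String)) : List String :=
  if arr_2d.isEmpty || arr_2d.any (fun row => row.isEmpty) then []
  else
    let rows : Int := arr_2d.length
    let _cols : Option Int := PySem.List.max? (arr_2d.map (fun row => (row.length : Int))) (fun y => y)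
    (PySem.List.pyGetD arr_2d 0 []).foldl (fun acc a =>
      (PySem.List.pyRange 1 rows 1).foldl (fun acc b =>
        (PySem.List.pyRange 0 ((PySem.List.pyGetD arr_2d b []).length : Int) 1).foldl (fun acc c =>
          let next_element := PySem.List.pyGetD (PySem.List.pyGetD arr_2d b []) c ""
          acc ++ [pvFmt a next_element]) acc) acc) []

-- ===== PORT B =====
def generate_combinations_2d_alt (arr_2d : List (List String)) : List String :=
  if arr_2d.isEmpty || arr_2d.any (fun row => row.isEmpty) then []
  else
    let head := PySem.List.pyGetD arr_2d 0 []
    let flat := (PySem.List.pyRange 1 (arr_2d.length : Int) 1).foldl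
      (fun acc i => acc ++ PySem.List.pyGetD arr_2d i []) []
    let m : Int := flat.length
    (PySem.List.pyRange 0 ((head.length : Int) * m) 1).map (fun k =>
      pvFmt (PySem.List.pyGetD head (PySem.Int.floordiv k m) "")
            (PySem.List.pyGetD flat (PySem.Int.mod k m) ""))

-- ===== PRECONDITION & SPEC =====
def Spec_generate_combinations_2d (arr_2d : List (List String)) (out : List String) : Prop := out = generate_combinations_2d_alt arr_2d
instance (arr_2d : List (List String)) (out : List String) : Decidable (Spec_generate_combinations_2d arr_2d out) := by unfold Spec_generate_combinations_2d; infer_instance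

-- ===== CLAIM (what is proved, stated in full; the proofs are below) =====
def Claim_equal_generate_combinations_2d : Prop := ∀ (arr_2d : List (List String)), Dom_generate_combinations_2d arr_2d → Spec_generate_combinations_2d arr_2d (generate_combinations_2d arr_2d)

-- ===== LEMMAS AND PROOFS =====

theorem map_getD_range {β : Type} (fl : List β) (d : β) :
    (List.range fl.length).map (fun k => fl.getD k d) = fl := by
  apply List.ext_getElem
  · simp
  · intro i h1 h2
    simp [List.getElem?_eq_getElem h2]

theorem foldl_append_eq_flatten {β : Type} (l : List (List β)) :
    ∀ init : List β, l.foldl (fun acc r => acc ++ r) init = init ++ l.flatten := by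
  induction l with
  | nil => intro init; simp
  | cons r rs ih => intro init; simp [List.foldl_cons, ih]

-- Cartesian pairing as a single range over k with divmod indexing (Nat level)
theorem flatMap_eq_range_divmod {α β γ : Type} (f : α → β → γ) (d1 : α) (d2 : β)
    (hd : List α) (fl : List β) :
    hd.flatMap (fun a => fl.map (f a)) =
    (List.range (hd.length * fl.length)).map
      (fun k => f (hd.getD (k / fl.length) d1) (fl.getD (k % fl.length) d2)) := by
  induction hd with
  | nil => simp
  | cons a rest ih =>
    rcases Nat.eq_zero_or_pos fl.length with hm | hm
    · rw [List.length_eq_zero_iff] at hm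
      subst hm; simp
    · have hlen : (a :: rest).length * fl.length = fl.length + rest.length * fl.length := by
        simp [List.length_cons]; ring
      rw [hlen, List.range_add, List.map_append]
      have h1 : (List.range fl.length).map
          (fun k => f ((a :: rest).getD (k / fl.length) d1) (fl.getD (k % fl.length) d2)) =
          fl.map (f a) := by
        rw [List.map_congr_left (l := List.range fl.length)
          (g := fun k => f a (fl.getD k d2)) ?_]
        · rw [show (fun k => f a (fl.getD k d2)) = (f a) ∘ (fun k => fl.getD k d2) from rfl,
            ← List.map_map, map_getD_range]
        · intro k hk
          rw [List.mem_range] at hk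
          rw [Nat.div_eq_of_lt hk, Nat.mod_eq_of_lt hk, List.getD_cons_zero]
      have h2 : ((List.range (rest.length * fl.length)).map (fun x => fl.length + x)).map
          (fun k => f ((a :: rest).getD (k / fl.length) d1) (fl.getD (k % fl.length) d2)) =
          rest.flatMap (fun a => fl.map (f a)) := by
        rw [List.map_map, ih]
        apply List.map_congr_left
        intro k _
        have hdiv : (fl.length + k) / fl.length = k / fl.length + 1 := by
          rw [Nat.add_comm, Nat.add_div_right _ hm]
        have hmod : (fl.length + k) % fl.length = k % fl.length := by
          rw [Nat.add_comm, Nat.add_mod_right]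
        simp only [Function.comp_apply, hdiv, hmod, List.getD_cons_succ]
      rw [h1, h2, List.flatMap_cons]

-- the same statement over pyRange / floordiv / mod (what port B computes)
theorem range_divmod_bridge (hd fl : List String) :
    (PySem.List.pyRange 0 ((hd.length : Int) * (fl.length : Int)) 1).map (fun k =>
      pvFmt (PySem.List.pyGetD hd (PySem.Int.floordiv k (fl.length : Int)) "")
            (PySem.List.pyGetD fl (PySem.Int.mod k (fl.length : Int)) "")) =
    hd.flatMap (fun a => fl.map (pvFmt a)) := by
  have hc : ((hd.length : Int) * (fl.length : Int)) = ((hd.length * fl.length : Nat) : Int) := by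
    push_cast; ring
  rw [hc, PySem.List.pyRange_zero_nat, List.map_map,
    flatMap_eq_range_divmod pvFmt "" "" hd fl]
  apply List.map_congr_left
  intro k _
  simp only [Function.comp_apply, PySem.Int.floordiv_natCast, PySem.Int.mod_natCast,
    PySem.List.pyGetD_natCast]

theorem gen2d_eq (arr_2d : List (List String)) :
    generate_combinations_2d arr_2d = generate_combinations_2d_alt arr_2d := by
  unfold generate_combinations_2d generate_combinations_2d_alt
  split
  · rfl
  · have hflat : (PySem.List.pyRange 1 (arr_2d.length : Int) 1).foldl
        (fun acc i => acc ++ PySem.List.pyGetD arr_2d i []) ([] : List String) =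
        (arr_2d.drop 1).flatten := by
      rw [PySem.List.foldl_pyRange_pyGetD' arr_2d [] (fun acc r => acc ++ r) [] (by norm_num)]
      simpa using foldl_append_eq_flatten (arr_2d.drop (1 : Int).toNat) []
    simp only [PySem.List.pyGetD_zero, PySem.List.foldl_append_singleton_eq_map,
      PySem.List.foldl_append_eq_flatMap, List.nil_append, hflat]
    rw [range_divmod_bridge]
    have hrow : ∀ a : String,
        (PySem.List.pyRange 1 (arr_2d.length : Int) 1).flatMap
          (fun b => ((PySem.List.pyRange 0 ((PySem.List.pyGetD arr_2d b []).length : Int) 1).map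
            (fun c => pvFmt a (PySem.List.pyGetD (PySem.List.pyGetD arr_2d b []) c "")))) =
        (arr_2d.drop 1).flatMap (fun row => row.map (fun ne => pvFmt a ne)) := by
      intro a
      have hmap : (PySem.List.pyRange 1 (arr_2d.length : Int) 1).map
          (fun b => PySem.List.pyGetD arr_2d b ([] : List String)) = arr_2d.drop 1 := by
        simpa using PySem.List.map_pyGetD_pyRange' (xs := arr_2d) (d := ([] : List String)) (a := 1) (by norm_num)
      calc (PySem.List.pyRange 1 (arr_2d.length : Int) 1).flatMap
            (fun b => ((PySem.List.pyRange 0 ((PySem.List.pyGetD arr_2d b []).length : Int) 1).map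
              (fun c => pvFmt a (PySem.List.pyGetD (PySem.List.pyGetD arr_2d b []) c ""))))
          = ((PySem.List.pyRange 1 (arr_2d.length : Int) 1).map
              (fun b => PySem.List.pyGetD arr_2d b ([] : List String))).flatMap
              (fun row => (PySem.List.pyRange 0 (row.length : Int) 1).map
                (fun c => pvFmt a (PySem.List.pyGetD row c ""))) := by
            rw [List.flatMap_map]
        _ = (arr_2d.drop 1).flatMap (fun row => (PySem.List.pyRange 0 (row.length : Int) 1).map
              (fun c => pvFmt a (PySem.List.pyGetD row c ""))) := by rw [hmap]
        _ = (arr_2d.drop 1).flatMap (fun row => row.map (fun ne => pvFmt a ne)) := by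
            apply List.flatMap_congr
            intro row _
            have : (PySem.List.pyRange 0 (row.length : Int) 1).map
                (fun c => pvFmt a (PySem.List.pyGetD row c "")) =
                ((PySem.List.pyRange 0 (row.length : Int) 1).map
                  (fun c => PySem.List.pyGetD row c "")).map (fun ne => pvFmt a ne) := by
              rw [List.map_map]; rfl
            rw [this, PySem.List.map_pyGetD_pyRange_zero']
    simp only [hrow]
    apply List.flatMap_congr
    intro a _
    simp [List.flatMap_def, List.map_flatten]

-- ===== VERDICT (by name: the statement is the Claim_ definition above) =====
theorem generate_combinations_2d_spec : Claim_equal_generate_combinations_2d := by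
  intro arr_2d _
  unfold Spec_generate_combinations_2d
  exact gen2d_eq arr_2d
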